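-- pv_equiv track=rewrite | github.com/VentureTeam10/AlgorithmStudy | 42578/42578.py | solution
-- ===== SOURCE A (Python) =====
-- def solution(clothes):
--     answer = 1
--     hanger_dict = {}
--
--     for clo in clothes :
--         if clo[1] not in hanger_dict.keys() :
--             hanger_dict[ clo[1] ] = 1
--         else :
--             hanger_dict[ clo[1] ] += 1
--
--     for key, value in hanger_dict.items() :
--         answer *= ( value + 1 )
--
--     answer -= 1
--
--     return answer
-- ===== SOURCE B (Python) =====
-- def solution(clothes):
--     cats = [clo[1] for clo in clothes]
--     answer = 1
--     while cats:
--         first = cats[0]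
--         rest = [c for c in cats if c != first]
--         answer *= (len(cats) - len(rest)) + 1
--         cats = rest
--     return answer - 1
-- ===== Notes on version B (the rewrite author's own statement) =====
-- stated objective: alternative
-- what changed: Replaces the dict-of-counts plus items pass by repeated extraction: peel off the first remaining category, count its occurrences as a length difference after filtering it out, multiply the running answer, and recurse on the filtered list (no dict at all).
import Mathlib
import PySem

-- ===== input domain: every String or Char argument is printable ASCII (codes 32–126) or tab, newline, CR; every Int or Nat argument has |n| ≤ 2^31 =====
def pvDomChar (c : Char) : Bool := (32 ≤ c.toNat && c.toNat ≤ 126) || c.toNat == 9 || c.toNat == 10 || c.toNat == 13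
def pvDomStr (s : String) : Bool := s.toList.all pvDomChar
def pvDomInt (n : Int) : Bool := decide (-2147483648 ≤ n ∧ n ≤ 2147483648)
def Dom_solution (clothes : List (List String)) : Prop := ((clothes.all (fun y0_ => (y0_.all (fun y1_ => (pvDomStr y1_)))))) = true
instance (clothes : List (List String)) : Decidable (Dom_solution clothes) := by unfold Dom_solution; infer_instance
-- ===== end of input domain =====

-- B replaces the dict of counts by repeated extraction of one category at a time (filtering);
-- objective: alternative decomposition, no dict. Not claimed faster.

-- ===== PORT A =====
def solution (clothes : List (List String)) : Int :=
  let hangerDict := clothes.foldl (fun d clo =>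
      let k := (PySem.List.pyGet? clo 1).getD ""   -- clo[1]; none (IndexError) excluded by Pre_solution
      if d.contains k then d.insert k (((d.get? k).getD 0) + 1)
      else d.insert k 1) PySem.Dict.empty
  let answer := hangerDict.items.foldl (fun a kv => a * (kv.2 + 1)) (1 : Int)
  answer - 1

-- ===== PORT B =====
def solutionAltLoop (cats : List String) (answer : Int) : Int :=
  match cats with
  | [] => answer
  | first :: tail =>
    let rest := (first :: tail).filter (fun c => c != first)
    solutionAltLoop rest (answer * ((((first :: tail).length : Int) - (rest.length : Int)) + 1))
termination_by cats.length
decreasing_by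
  have h1 : (first :: tail).filter (fun c => c != first) = tail.filter (fun c => c != first) := by
    simp
  simpa [h1] using Nat.lt_succ_of_le (List.length_filter_le _ tail)

def solution_alt (clothes : List (List String)) : Int :=
  let cats := clothes.map (fun clo => (PySem.List.pyGet? clo 1).getD "")   -- clo[1], same IndexError domain as A
  solutionAltLoop cats 1 - 1

-- ===== PRECONDITION & SPEC =====
-- Pre_ excludes exactly the inputs where Python A raises IndexError at clo[1] (some garment list shorter than 2).
def Pre_solution (clothes : List (List String)) : Prop := ∀ c ∈ clothes, 2 ≤ c.length
instance (clothes : List (List String)) : Decidable (Pre_solution clothes) := by unfold Pre_solution; infer_instance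
def pvWitness_solution : List (List String) := [["yellow_hat", "headgear"], ["blue_sunglasses", "eyewear"], ["green_turban", "headgear"]]

def Spec_solution (clothes : List (List String)) (out : Int) : Prop := out = solution_alt clothes
instance (clothes : List (List String)) (out : Int) : Decidable (Spec_solution clothes out) := by unfold Spec_solution; infer_instance

-- ===== CLAIM (what is proved, stated in full; the proofs are below) =====
def Claim_equal_solution : Prop := ∀ (clothes : List (List String)), Dom_solution clothes → Pre_solution clothes → Spec_solution clothes (solution clothes)

-- ===== LEMMAS AND PROOFS =====

-- the common value both programs compute before the final '- 1'
def prodF (cats : List String) : Int :=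
  ((PySem.Set.ofList cats).map (fun k => (k, (cats.count k : Int)))).foldl (fun a kv => a * (kv.2 + 1)) 1

theorem foldl_mul_factor (l : List (String × Int)) (c : Int) :
    l.foldl (fun a kv => a * (kv.2 + 1)) c = c * l.foldl (fun a kv => a * (kv.2 + 1)) 1 := by
  induction l generalizing c with
  | nil => simp
  | cons x t ih =>
    simp only [List.foldl_cons]
    rw [ih (c * (x.2 + 1)), ih (1 * (x.2 + 1))]
    ring

theorem foldl_add_cons (a : String) (xs : List String) (h : ∀ c ∈ xs, c ≠ a) :
    ∀ s : List String, xs.foldl PySem.Set.add (a :: s) = a :: xs.foldl PySem.Set.add s := by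
  induction xs with
  | nil => intro s; simp
  | cons x t ih =>
    intro s
    have hx : x ≠ a := h x (by simp)
    have hstep : PySem.Set.add (a :: s) x = a :: PySem.Set.add s x := by
      rw [PySem.Set.add_eq_ite, PySem.Set.add_eq_ite]
      by_cases hm : x ∈ s
      · simp [hm]
      · simp [hm, hx]
    simp only [List.foldl_cons, hstep]
    exact ih (fun c hc => h c (by simp [hc])) _
  
theorem foldl_add_filter (x : String) (xs : List String) :
    ∀ s : List String, x ∈ s →
      xs.foldl PySem.Set.add s = (xs.filter (fun c => c != x)).foldl PySem.Set.add s := by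
  induction xs with
  | nil => intro s _; simp
  | cons y t ih =>
    intro s hs
    by_cases hyx : y = x
    · have : (y != x) = false := by simp [hyx]
      simp only [List.filter_cons, this, if_neg Bool.false_ne_true, List.foldl_cons]
      rw [PySem.Set.add_of_mem (by simpa [hyx] using hs)]
      exact ih s hs
    · have : (y != x) = true := by simp [hyx]
      simp only [List.filter_cons, this, List.foldl_cons]
      exact ih (PySem.Set.add s y) (by rw [PySem.Set.mem_add]; exact Or.inl hs)

theorem ofList_cons_filter (x : String) (xs : List String) :
    PySem.Set.ofList (x :: xs) = x :: PySem.Set.ofList (xs.filter (fun c => c != x)) := by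
  have hadd : PySem.Set.add ([] : List String) x = [x] := by
    simp
  rw [PySem.Set.ofList_eq_foldl, PySem.Set.ofList_eq_foldl, List.foldl_cons, hadd]
  rw [foldl_add_filter x xs [x] (by simp)]
  exact foldl_add_cons x _ (fun c hc => by
    have := List.of_mem_filter hc
    simpa using this) []

theorem length_filter_count (x : String) (tail : List String) :
    tail.length = (tail.filter (fun c => c != x)).length + tail.count x := by
  induction tail with
  | nil => simp
  | cons y t ih =>
    by_cases hyx : y = x
    · simp [hyx]; omega
    · simp [hyx, bne_iff_ne]; omega

theorem count_filter_ne (k x : String) (hk : k ≠ x) (l : List String) :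
    (l.filter (fun c => c != x)).count k = l.count k := by
  induction l with
  | nil => rfl
  | cons y t ih =>
    by_cases hyx : y = x
    · have h1 : (y != x) = false := by simp [hyx]
      have h2 : (y == k) = false := by simp [hyx]; exact fun h => hk h.symm
      simp [h1, List.count_cons, h2, ih]
    · simp [hyx, List.count_cons, ih]

theorem prodF_cons (x : String) (tail : List String) :
    prodF (x :: tail) = (((x :: tail).count x : Int) + 1) * prodF (tail.filter (fun c => c != x)) := by
  have hmap : (PySem.Set.ofList (x :: tail)).map (fun k => (k, ((x :: tail).count k : Int)))
      = (x, ((x :: tail).count x : Int)) ::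
        (PySem.Set.ofList (tail.filter (fun c => c != x))).map
          (fun k => (k, ((tail.filter (fun c => c != x)).count k : Int))) := by
    rw [ofList_cons_filter, List.map_cons]
    congr 1
    apply List.map_congr_left
    intro k hk
    have hkrest : k ∈ tail.filter (fun c => c != x) := (PySem.Set.mem_ofList _ _).mp hk
    have hkne : k ≠ x := by
      have := List.of_mem_filter hkrest
      simpa using this
    have hcnt : (x :: tail).count k = (tail.filter (fun c => c != x)).count k := by
      rw [List.count_cons]
      have hxk : (x == k) = false := by simp; exact fun h => hkne h.symm
      simp [hxk]
      exact (count_filter_ne k x hkne tail).symm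
    simp [hcnt]
  rw [prodF, hmap, List.foldl_cons, foldl_mul_factor, prodF]
  ring

theorem altLoop_eq : ∀ (n : Nat) (cats : List String), cats.length ≤ n → ∀ a : Int,
    solutionAltLoop cats a = a * prodF cats := by
  intro n
  induction n with
  | zero =>
    intro cats hlen a
    have : cats = [] := List.eq_nil_of_length_eq_zero (Nat.le_zero.mp hlen)
    subst this
    simp [solutionAltLoop, prodF, PySem.Set.ofList]
  | succ m ih =>
    intro cats hlen a
    match cats with
    | [] => simp [solutionAltLoop, prodF, PySem.Set.ofList]
    | x :: tail =>
      rw [solutionAltLoop]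
      have hrest : ((x :: tail).filter (fun c => c != x)) = tail.filter (fun c => c != x) := by simp
      simp only [hrest]
      have hlenrest : (tail.filter (fun c => c != x)).length ≤ m := by
        have h1 := List.length_filter_le (fun c => c != x) tail
        simp only [List.length_cons] at hlen
        omega
      rw [ih _ hlenrest]
      have hcount : (((x :: tail).length : Int) - ((tail.filter (fun c => c != x)).length : Int)) + 1
          = ((x :: tail).count x : Int) + 1 := by
        have h1 := length_filter_count x tail
        have h2 : (x :: tail).count x = tail.count x + 1 := by simp
        simp only [List.length_cons, h2]
        push_cast
        omega
      rw [hcount, prodF_cons]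
      ring

theorem solution_eq (clothes : List (List String)) :
    solution clothes = prodF (clothes.map (fun clo => (PySem.List.pyGet? clo 1).getD "")) - 1 := by
  rw [solution]
  set cats := clothes.map (fun clo => (PySem.List.pyGet? clo 1).getD "") with hcats
  have hfold : clothes.foldl (fun d clo =>
      let k := (PySem.List.pyGet? clo 1).getD ""
      if d.contains k then d.insert k (((d.get? k).getD 0) + 1)
      else d.insert k 1) PySem.Dict.empty
      = cats.foldl (fun (d : PySem.Dict String Int) k =>
          if d.contains k then d.insert k (((d.get? k).getD 0) + 1)
          else d.insert k 1) PySem.Dict.empty := by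
    rw [hcats, List.foldl_map]
  have hstep : (fun (d : PySem.Dict String Int) k =>
        if d.contains k then d.insert k (((d.get? k).getD 0) + 1)
        else d.insert k 1)
      = (fun (d : PySem.Dict String Int) k => d.insert k (d.getD k 0 + 1)) := by
    funext d k
    by_cases h : d.contains k = true
    · simp only [h, if_pos]
      rw [PySem.Dict.getD_eq_get?_getD]
    · simp only [h, if_neg Bool.false_ne_true]
      rw [PySem.Dict.getD_of_not_contains d 0 (by simpa using h)]
      norm_num
  rw [hfold, hstep, PySem.Dict.foldl_insert_getD_add_one_eq_counter,
      ]
  have : (PySem.Dict.counter cats).items = (PySem.Set.ofList cats).map (fun k => (k, (cats.count k : Int))) :=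
    PySem.Dict.items_counter cats
  rw [this, prodF]

-- ===== VERDICT (by name: the statement is the Claim_ definition above) =====
theorem solution_spec : Claim_equal_solution := by
  intro clothes _ _
  unfold Spec_solution
  rw [solution_eq, solution_alt]
  rw [altLoop_eq (clothes.map (fun clo => (PySem.List.pyGet? clo 1).getD "")).length _ le_rfl 1]
  ring
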